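-- pv_equiv track=rewrite | github.com/dhruvdcoder/xlm-core | src/xlm/commands/hydra_callbacks.py | _get_important_default_list_elements
-- ===== SOURCE A (Python) =====
-- from typing import Any, Dict, List, Optional
--
-- def _get_important_default_list_elements(
--     defaults_list: List[str],
-- ) -> Dict[str, List[str]]:
--     return {
--         "datamodule": [
--             d for d in defaults_list if d.startswith("datamodule/")
--         ],
--         "datasets": [d for d in defaults_list if d.startswith("datasets/")],
--         "collator": [d for d in defaults_list if d.startswith("collator/")],
--         "model": [
--             d
--             for d in defaults_list
--             if d.startswith("model/") and not d.startswith("model_type/")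
--         ],
--         "model_type": [
--             d for d in defaults_list if d.startswith("model_type/")
--         ],
--     }
-- ===== SOURCE B (Python) =====
-- def _get_important_default_list_elements(defaults_list):
--     result = {"datamodule": [], "datasets": [], "collator": [], "model": [], "model_type": []}
--     for d in defaults_list:
--         if d.startswith("datamodule/"):
--             result["datamodule"].append(d)
--         elif d.startswith("datasets/"):
--             result["datasets"].append(d)
--         elif d.startswith("collator/"):
--             result["collator"].append(d)
--         elif d.startswith("model_type/"):
--             result["model_type"].append(d)
--         elif d.startswith("model/"):
--             result["model"].append(d)
--     return result
-- ===== Notes on version B (the rewrite author's own statement) =====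
-- stated objective: alternative
-- what changed: Replaced five separate list-comprehension scans of defaults_list by a single pass that dispatches each element into one of five pre-initialized buckets; the mutual exclusivity of the prefixes (checking model_type/ before model/) makes the and-not guard unnecessary.
import Mathlib
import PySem

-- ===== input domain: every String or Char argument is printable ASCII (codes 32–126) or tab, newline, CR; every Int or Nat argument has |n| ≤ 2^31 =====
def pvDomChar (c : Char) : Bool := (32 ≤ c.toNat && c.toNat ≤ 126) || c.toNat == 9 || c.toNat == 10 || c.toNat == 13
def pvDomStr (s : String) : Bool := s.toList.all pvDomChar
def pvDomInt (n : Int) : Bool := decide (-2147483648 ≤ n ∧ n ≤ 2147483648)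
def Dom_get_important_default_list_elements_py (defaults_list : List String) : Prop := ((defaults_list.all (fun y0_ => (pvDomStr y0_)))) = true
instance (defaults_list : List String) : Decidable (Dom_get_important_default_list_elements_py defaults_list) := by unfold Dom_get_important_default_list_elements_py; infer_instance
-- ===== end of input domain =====

-- B replaces A's five separate comprehension scans by one pass dispatching each element into five buckets (alternative decomposition, same cost class).

-- ===== PORT A =====
def get_important_default_list_elements_py (defaults_list : List String) : List (String × List String) :=
  [("datamodule", defaults_list.filter (fun d => PySem.Str.startswith d "datamodule/")),
   ("datasets",   defaults_list.filter (fun d => PySem.Str.startswith d "datasets/")),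
   ("collator",   defaults_list.filter (fun d => PySem.Str.startswith d "collator/")),
   ("model",      defaults_list.filter (fun d => PySem.Str.startswith d "model/" && !PySem.Str.startswith d "model_type/")),
   ("model_type", defaults_list.filter (fun d => PySem.Str.startswith d "model_type/"))]

-- ===== PORT B =====
-- state = (datamodule, datasets, collator, model, model_type) buckets, appended in order
def pvAltStep (st : List String × List String × List String × List String × List String)
    (d : String) : List String × List String × List String × List String × List String :=
  let (dm, ds, co, mo, mt) := st
  if PySem.Str.startswith d "datamodule/" then (dm ++ [d], ds, co, mo, mt)
  else if PySem.Str.startswith d "datasets/" then (dm, ds ++ [d], co, mo, mt)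
  else if PySem.Str.startswith d "collator/" then (dm, ds, co ++ [d], mo, mt)
  else if PySem.Str.startswith d "model_type/" then (dm, ds, co, mo, mt ++ [d])
  else if PySem.Str.startswith d "model/" then (dm, ds, co, mo ++ [d], mt)
  else (dm, ds, co, mo, mt)

def get_important_default_list_elements_py_alt (defaults_list : List String) : List (String × List String) :=
  let st := defaults_list.foldl pvAltStep ([], [], [], [], [])
  [("datamodule", st.1), ("datasets", st.2.1), ("collator", st.2.2.1),
   ("model", st.2.2.2.1), ("model_type", st.2.2.2.2)]

-- ===== PRECONDITION & SPEC =====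
def Spec_get_important_default_list_elements_py (defaults_list : List String) (out : List (String × List String)) : Prop := out = get_important_default_list_elements_py_alt defaults_list
instance (defaults_list : List String) (out : List (String × List String)) : Decidable (Spec_get_important_default_list_elements_py defaults_list out) := by unfold Spec_get_important_default_list_elements_py; infer_instance

-- ===== CLAIM (what is proved, stated in full; the proofs are below) =====
def Claim_equal_get_important_default_list_elements_py : Prop := ∀ (defaults_list : List String), Dom_get_important_default_list_elements_py defaults_list → Spec_get_important_default_list_elements_py defaults_list (get_important_default_list_elements_py defaults_list)

-- ===== LEMMAS AND PROOFS =====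

-- two incomparable prefixes cannot both be prefixes of the same string
theorem pv_startswith_excl (s p q : String)
    (hpq : ¬ (p.toList <+: q.toList)) (hqp : ¬ (q.toList <+: p.toList)) :
    ¬ (PySem.Str.startswith s p = true ∧ PySem.Str.startswith s q = true) := by
  rintro ⟨hp, hq⟩
  simp only [PySem.Str.startswith_eq, PySem.Chars.startswith_iff] at hp hq
  rcases (List.prefix_or_prefix_of_prefix hp hq) with h | h
  · exact hpq h
  · exact hqp h

-- the loop accumulates exactly A's five filters onto the initial buckets
theorem pv_foldl_spec (l : List String) (dm ds co mo mt : List String) :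
    l.foldl pvAltStep (dm, ds, co, mo, mt) =
      (dm ++ l.filter (fun d => PySem.Str.startswith d "datamodule/"),
       ds ++ l.filter (fun d => PySem.Str.startswith d "datasets/"),
       co ++ l.filter (fun d => PySem.Str.startswith d "collator/"),
       mo ++ l.filter (fun d => PySem.Str.startswith d "model/" && !PySem.Str.startswith d "model_type/"),
       mt ++ l.filter (fun d => PySem.Str.startswith d "model_type/")) := by
  induction l generalizing dm ds co mo mt with
  | nil => simp
  | cons d tl ih =>
    have e1 := pv_startswith_excl d "datamodule/" "datasets/" (by decide) (by decide)
    have e2 := pv_startswith_excl d "datamodule/" "collator/" (by decide) (by decide)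
    have e3 := pv_startswith_excl d "datamodule/" "model/" (by decide) (by decide)
    have e4 := pv_startswith_excl d "datamodule/" "model_type/" (by decide) (by decide)
    have e5 := pv_startswith_excl d "datasets/" "collator/" (by decide) (by decide)
    have e6 := pv_startswith_excl d "datasets/" "model/" (by decide) (by decide)
    have e7 := pv_startswith_excl d "datasets/" "model_type/" (by decide) (by decide)
    have e8 := pv_startswith_excl d "collator/" "model/" (by decide) (by decide)
    have e9 := pv_startswith_excl d "collator/" "model_type/" (by decide) (by decide)
    have e10 := pv_startswith_excl d "model/" "model_type/" (by decide) (by decide)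
    simp only [List.foldl_cons, pvAltStep, List.filter_cons]
    cases h1 : PySem.Str.startswith d "datamodule/" <;>
    cases h2 : PySem.Str.startswith d "datasets/" <;>
    cases h3 : PySem.Str.startswith d "collator/" <;>
    cases h4 : PySem.Str.startswith d "model_type/" <;>
    cases h5 : PySem.Str.startswith d "model/" <;>
      first
      | (exfalso; first
          | exact e1 ⟨h1, h2⟩ | exact e2 ⟨h1, h3⟩ | exact e3 ⟨h1, h5⟩ | exact e4 ⟨h1, h4⟩
          | exact e5 ⟨h2, h3⟩ | exact e6 ⟨h2, h5⟩ | exact e7 ⟨h2, h4⟩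
          | exact e8 ⟨h3, h5⟩ | exact e9 ⟨h3, h4⟩ | exact e10 ⟨h5, h4⟩)
      | simp [ih, h1, h2, h3, h4, h5]

-- ===== VERDICT (by name: the statement is the Claim_ definition above) =====
theorem get_important_default_list_elements_py_spec : Claim_equal_get_important_default_list_elements_py := by
  intro l _hd
  show get_important_default_list_elements_py l = get_important_default_list_elements_py_alt l
  simp [get_important_default_list_elements_py, get_important_default_list_elements_py_alt,
    pv_foldl_spec]
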